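-- pv_equiv track=rewrite | github.com/ConfidentLetter/instanimals | backend/src/algorithms/recommender.py | diversify_rank
-- ===== SOURCE A (Python) =====
-- def _get(p: dict, key: str, default=None):
--     v = p.get(key, default)
--     return default if v is None else v
--
-- def similarity(a: dict, b: dict) -> float:
--     s = 0.0
--     if _get(a, "species", "") == _get(b, "species", ""):
--         s += 3.0
--     if _get(a, "breed", "") == _get(b, "breed", ""):
--         s += 6.0
--     if _get(a, "size", "") == _get(b, "size", ""):
--         s += 1.0
--     return s
--
-- def diversify_rank(candidates: list, k: int = 12) -> list:
--     if not candidates: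
--         return []
--     picked = [candidates[0]]
--     remaining = candidates[1:]
--     while remaining and len(picked) < k:
--         best = None
--         best_score = None
--         for c in remaining:
--             sim = min(similarity(c, p) for p in picked)
--             if best is None or sim < best_score:
--                 best = c
--                 best_score = sim
--         picked.append(best)
--         remaining.remove(best)
--     return picked
-- ===== SOURCE B (Python) =====
-- def _get(p: dict, key: str, default=None):
--     v = p.get(key, default)
--     return default if v is None else v
--
-- def similarity(a: dict, b: dict) -> float:
--     s = 0.0
--     if _get(a, "species", "") == _get(b, "species", ""):
--         s += 3.0
--     if _get(a, "breed", "") == _get(b, "breed", ""):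
--         s += 6.0
--     if _get(a, "size", "") == _get(b, "size", ""):
--         s += 1.0
--     return s
--
-- def diversify_rank(candidates: list, k: int = 12) -> list:
--     # Greedy max-min diversification with an incremental min-similarity cache:
--     # each remaining candidate carries its min similarity to the picked set,
--     # updated only against the newly picked item (O(k*n) similarity calls
--     # instead of A's O(k^2*n)).
--     if not candidates:
--         return []
--     first = candidates[0]
--     picked = [first]
--     cache = [(c, similarity(c, first)) for c in candidates[1:]]
--     while cache and len(picked) < k:
--         best = None
--         for j, (c, s) in enumerate(cache):
--             if best is None or s < best[2]:
--                 best = (j, c, s)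
--         bi, chosen, _ = best
--         cache.pop(bi)
--         picked.append(chosen)
--         cache = [(c, min(s, similarity(c, chosen))) for (c, s) in cache]
--     return picked
-- ===== Notes on version B (the rewrite author's own statement) =====
-- stated objective: faster
-- what changed: Instead of recomputing min-similarity of every remaining candidate against the whole picked list each round, B caches each candidate's min similarity and updates it only against the newly picked item, selecting by index and popping it.
import Mathlib
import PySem

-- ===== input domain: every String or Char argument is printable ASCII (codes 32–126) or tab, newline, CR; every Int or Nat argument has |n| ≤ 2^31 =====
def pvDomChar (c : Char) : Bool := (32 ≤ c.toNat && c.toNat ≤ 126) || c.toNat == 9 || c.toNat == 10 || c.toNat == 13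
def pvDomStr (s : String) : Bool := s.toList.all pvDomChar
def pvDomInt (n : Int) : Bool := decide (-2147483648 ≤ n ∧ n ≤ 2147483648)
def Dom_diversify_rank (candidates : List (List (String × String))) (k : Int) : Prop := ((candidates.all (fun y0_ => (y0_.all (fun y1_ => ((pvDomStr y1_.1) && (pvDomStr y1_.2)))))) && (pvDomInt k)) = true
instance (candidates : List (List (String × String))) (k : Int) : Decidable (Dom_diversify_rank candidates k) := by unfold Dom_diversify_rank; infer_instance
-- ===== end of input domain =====

-- ===== PORT A =====
-- B replaces A's per-round recomputation of each candidate's min-similarity to the whole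
-- picked list by an incrementally updated (candidate, cached min-similarity) list.
-- _get(p, key, "") on a dict: association-list lookup with default "".
def pvGet (p : List (String × String)) (key : String) : String :=
  ((PySem.Dict.mk p).get? key).getD ""

-- similarity: the Python floats 0.0/1.0/3.0/4.0/6.0/7.0/9.0/10.0 are all integral, ported as Int (exact).
def pvSim (a b : List (String × String)) : Int :=
  let s : Int := 0
  let s := if pvGet a "species" == pvGet b "species" then s + 3 else s
  let s := if pvGet a "breed" == pvGet b "breed" then s + 6 else s
  let s := if pvGet a "size" == pvGet b "size" then s + 1 else s
  s

-- min(similarity(c, p) for p in picked)  (picked is nonempty whenever A evaluates this)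
def pvMinSim (c : List (String × String)) (picked : List (List (String × String))) : Int :=
  match picked with
  | [] => 0
  | p :: ps => ps.foldl (fun acc q => min acc (pvSim c q)) (pvSim c p)

-- the body of A's inner for-loop (the best/best_score update)
def pvStepA {α : Type} (sc : α → Int) (best : Option (α × Int)) (c : α) : Option (α × Int) :=
  match best with
  | none => some (c, sc c)
  | some (_, bs) => if sc c < bs then some (c, sc c) else best

-- the body of B's inner for-loop over enumerate(cache)

-- A's inner for-loop
def pvSelA (picked rem : List (List (String × String))) :
    Option ((List (String × String)) × Int) :=
  rem.foldl (pvStepA (fun c => pvMinSim c picked)) none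

-- A's while loop (fuel = initial |remaining|; each iteration removes exactly one element)
def pvLoopA (fuel : Nat) (picked rem : List (List (String × String))) (k : Int) :
    List (List (String × String)) :=
  match fuel with
  | 0 => picked
  | fuel + 1 =>
    if rem ≠ [] ∧ (picked.length : Int) < k then
      match pvSelA picked rem with
      | none => picked
      | some (best, _) =>
        match PySem.List.remove? rem best with
        | none => picked
        | some rem' => pvLoopA fuel (picked ++ [best]) rem' k
    else picked

def diversify_rank (candidates : List (List (String × String))) (k : Int) :
    List (List (String × String)) :=
  match candidates with
  | [] => []
  | c0 :: rest => pvLoopA rest.length [c0] rest k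

-- ===== PORT B =====
-- the body of B's inner for-loop over enumerate(cache)
def pvStepB {α : Type} (best : Option (Int × α × Int)) (jcs : Int × α × Int) :
    Option (Int × α × Int) :=
  match best with
  | none => some jcs
  | some (_, _, bs) => if jcs.2.2 < bs then some jcs else best

-- B's inner for-loop: best = (index, candidate, cached score)
def pvSelB (cache : List ((List (String × String)) × Int)) :
    Option (Int × (List (String × String)) × Int) :=
  (PySem.List.enumerate cache).foldl pvStepB none

-- B's while loop over the (candidate, cached min-similarity) list
def pvLoopB (fuel : Nat) (picked : List (List (String × String)))
    (cache : List ((List (String × String)) × Int)) (k : Int) :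
    List (List (String × String)) :=
  match fuel with
  | 0 => picked
  | fuel + 1 =>
    if cache ≠ [] ∧ (picked.length : Int) < k then
      match pvSelB cache with
      | none => picked
      | some (bi, chosen, _) =>
        match PySem.List.pop? cache bi with
        | none => picked
        | some (_, rest) =>
          pvLoopB fuel (picked ++ [chosen])
            (rest.map (fun cs => (cs.1, min cs.2 (pvSim cs.1 chosen)))) k
    else picked

def diversify_rank_alt (candidates : List (List (String × String))) (k : Int) :
    List (List (String × String)) :=
  match candidates with
  | [] => []
  | first :: rest =>
    pvLoopB rest.length [first] (rest.map (fun c => (c, pvSim c first))) k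

-- ===== PRECONDITION & SPEC =====
def Spec_diversify_rank (candidates : List (List (String × String))) (k : Int) (out : List (List (String × String))) : Prop := out = diversify_rank_alt candidates k
instance (candidates : List (List (String × String))) (k : Int) (out : List (List (String × String))) : Decidable (Spec_diversify_rank candidates k out) := by unfold Spec_diversify_rank; infer_instance

-- ===== CLAIM (what is proved, stated in full; the proofs are below) =====
def Claim_equal_diversify_rank : Prop := ∀ (candidates : List (List (String × String))) (k : Int), Dom_diversify_rank candidates k → Spec_diversify_rank candidates k (diversify_rank candidates k)

-- ===== LEMMAS AND PROOFS =====

-- joint characterisation of A's and B's selection folds from a common accumulator: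
-- both return the leftmost minimum-score element, B also its index
lemma pvSel_both {α : Type} (sc : α → Int) :
    ∀ (cs pre : List α) (bi : Nat) (hbi : bi < pre.length),
    (∀ j (hj : j < bi), sc pre[bi] < sc (pre[j]'(by omega))) →
    (∀ j (hj : j < pre.length), sc pre[bi] ≤ sc (pre[j]'hj)) →
    ∃ bi', ∃ h' : bi' < (pre ++ cs).length,
      cs.foldl (pvStepA sc) (some (pre[bi], sc pre[bi]))
        = some ((pre ++ cs)[bi'], sc ((pre ++ cs)[bi'])) ∧
      (PySem.List.enumerate (cs.map (fun c => (c, sc c))) (pre.length : Int)).foldl pvStepB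
          (some ((bi : Int), pre[bi], sc pre[bi]))
        = some ((bi' : Int), (pre ++ cs)[bi'], sc ((pre ++ cs)[bi'])) ∧
      (∀ j (hj : j < bi'), sc ((pre ++ cs)[bi']) < sc ((pre ++ cs)[j]'(by omega))) ∧
      (∀ j (hj : j < (pre ++ cs).length), sc ((pre ++ cs)[bi']) ≤ sc ((pre ++ cs)[j]'hj)) := by
  intro cs
  induction cs with
  | nil =>
    intro pre bi hbi hstrict hle
    exact ⟨bi, by simpa using hbi, by simp, by simp, by simpa using hstrict, by simpa using hle⟩
  | cons c cs ih =>
    intro pre bi hbi hstrict hle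
    rw [List.map_cons, PySem.List.enumerate_cons]
    simp only [List.foldl_cons, pvStepA, pvStepB]
    by_cases hlt : sc c < sc pre[bi]
    · have hbi' : pre.length < (pre ++ [c]).length := by simp
      have hget : (pre ++ [c])[pre.length]'hbi' = c := by simp
      have hstrict' : ∀ j (hj : j < pre.length),
          sc ((pre ++ [c])[pre.length]'hbi') < sc ((pre ++ [c])[j]'(by omega)) := by
        intro j hj
        rw [hget, List.getElem_append_left hj]
        exact lt_of_lt_of_le hlt (hle j hj)
      have hle' : ∀ j (hj : j < (pre ++ [c]).length),
          sc ((pre ++ [c])[pre.length]'hbi') ≤ sc ((pre ++ [c])[j]'hj) := by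
        intro j hj
        rcases Nat.lt_or_ge j pre.length with h | h
        · exact le_of_lt (hstrict' j h)
        · have : j = pre.length := by simp at hj; omega
          subst this; simp
      obtain ⟨bi', h', hA, hB, hs, hl⟩ := ih (pre ++ [c]) pre.length hbi' hstrict' hle'
      simp only [List.append_assoc, List.cons_append, List.nil_append, List.length_append,
        List.length_cons, List.length_nil, Nat.cast_add, Nat.cast_one, Nat.cast_zero, hget] at h' hA hB hs hl
      refine ⟨bi', by simpa using h', ?_, ?_, by simpa using hs, by simpa using hl⟩
      · rw [if_pos hlt]; exact hA
      · rw [if_pos hlt]; exact hB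
    · have hbi' : bi < (pre ++ [c]).length := by simp; omega
      have hgetb : (pre ++ [c])[bi]'hbi' = pre[bi] := List.getElem_append_left hbi
      have hstrict' : ∀ j (hj : j < bi),
          sc ((pre ++ [c])[bi]'hbi') < sc ((pre ++ [c])[j]'(by omega)) := by
        intro j hj
        rw [hgetb, List.getElem_append_left (by omega)]
        exact hstrict j hj
      have hle' : ∀ j (hj : j < (pre ++ [c]).length),
          sc ((pre ++ [c])[bi]'hbi') ≤ sc ((pre ++ [c])[j]'hj) := by
        intro j hj
        rw [hgetb]
        rcases Nat.lt_or_ge j pre.length with h | h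
        · rw [List.getElem_append_left h]; exact hle j h
        · have : j = pre.length := by simp at hj; omega
          subst this
          simpa using not_lt.mp hlt
      obtain ⟨bi', h', hA, hB, hs, hl⟩ := ih (pre ++ [c]) bi hbi' hstrict' hle'
      simp only [List.append_assoc, List.cons_append, List.nil_append, List.length_append,
        List.length_cons, List.length_nil, Nat.cast_add, Nat.cast_one, Nat.cast_zero, hgetb] at h' hA hB hs hl
      refine ⟨bi', by simpa using h', ?_, ?_, by simpa using hs, by simpa using hl⟩
      · rw [if_neg hlt]; exact hA
      · rw [if_neg hlt]; exact hB

-- both selections on a nonempty list pick the same element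
lemma pvSel_spec (picked : List (List (String × String)))
    (c : List (String × String)) (cs : List (List (String × String))) :
    ∃ bi, ∃ h' : bi < (c :: cs).length,
      pvSelA picked (c :: cs) = some ((c :: cs)[bi], pvMinSim ((c :: cs)[bi]) picked) ∧
      pvSelB ((c :: cs).map (fun x => (x, pvMinSim x picked)))
        = some ((bi : Int), (c :: cs)[bi], pvMinSim ((c :: cs)[bi]) picked) ∧
      (∀ j (hj : j < bi), pvMinSim ((c :: cs)[bi]) picked < pvMinSim ((c :: cs)[j]'(by omega)) picked) := by
  obtain ⟨bi, h', hA, hB, hs, _⟩ := pvSel_both (fun x => pvMinSim x picked) cs [c] 0 (by simp)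
    (by intro j hj; omega) (by intro j hj; simp)
  simp only [List.singleton_append, List.length_singleton, Nat.cast_one, Nat.cast_zero,
    List.getElem_singleton] at h' hA hB hs
  refine ⟨bi, h', ?_, ?_, hs⟩
  · show List.foldl _ _ (c :: cs) = _
    rw [List.foldl_cons]
    simpa [pvStepA] using hA
  · show List.foldl _ _ (PySem.List.enumerate ((c :: cs).map fun x => (x, pvMinSim x picked)) 0) = _
    rw [List.map_cons, PySem.List.enumerate_cons, List.foldl_cons]
    simpa [pvStepB] using hB

-- appending one picked item updates the min-similarity incrementally
lemma pvMinSim_append (c q : List (String × String)) (p : List (String × String))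
    (ps : List (List (String × String))) :
    pvMinSim c ((p :: ps) ++ [q]) = min (pvMinSim c (p :: ps)) (pvSim c q) := by
  simp [pvMinSim, List.foldl_append]

-- erasing the first minimum = erasing at its index (no earlier equal element)
lemma pv_erase_eq_eraseIdx {α : Type} [BEq α] [LawfulBEq α] : ∀ (xs : List α) (bi : Nat)
    (h : bi < xs.length), (∀ j (hj : j < bi), xs[j]'(by omega) ≠ xs[bi]) →
    xs.erase xs[bi] = xs.eraseIdx bi := by
  intro xs
  induction xs with
  | nil => intro bi h; simp at h
  | cons x t ih =>
    intro bi h hne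
    cases bi with
    | zero => simp
    | succ n =>
      have hx : x ≠ (x :: t)[n+1] := hne 0 (by omega)
      have : (x :: t)[n+1] = t[n]'(by simpa using h) := by simp
      rw [this] at hx ⊢
      rw [List.erase_cons_tail (by simpa using hx)]
      simp only [List.eraseIdx_cons_succ]
      congr 1
      exact ih n (by simpa using h) (fun j hj => by
        have := hne (j+1) (by omega); simpa using this)

lemma pv_eraseIdx_map {α β : Type} (f : α → β) :
    ∀ (xs : List α) (i : Nat), (xs.map f).eraseIdx i = (xs.eraseIdx i).map f := by
  intro xs i
  induction xs generalizing i with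
  | nil => simp
  | cons x t ih => cases i <;> simp [List.eraseIdx, ih]

-- the two loops agree under the cache invariant
lemma pvLoop_eq : ∀ (fuel : Nat) (rem : List (List (String × String)))
    (p : List (String × String)) (ps : List (List (String × String))) (k : Int),
    pvLoopA fuel (p :: ps) rem k
      = pvLoopB fuel (p :: ps) (rem.map (fun c => (c, pvMinSim c (p :: ps)))) k := by
  intro fuel
  induction fuel with
  | zero => intro rem p ps k; rfl
  | succ fuel ih =>
    intro rem p ps k
    cases rem with
    | nil => simp [pvLoopA, pvLoopB]
    | cons c cs =>
      by_cases hk : (((p :: ps).length : Nat) : Int) < k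
      · obtain ⟨bi, hbi, hA, hB, hs⟩ := pvSel_spec (p :: ps) c cs
        have hne : ∀ j (hj : j < bi), (c :: cs)[j]'(by omega) ≠ (c :: cs)[bi] := by
          intro j hj heq
          exact absurd (heq ▸ hs j hj) (lt_irrefl _)
        have hrem : PySem.List.remove? (c :: cs) ((c :: cs)[bi])
            = some ((c :: cs).eraseIdx bi) := by
          rw [PySem.List.remove?_eq_some_erase _ _ (List.getElem_mem hbi),
            pv_erase_eq_eraseIdx _ bi hbi hne]
        have hpop : PySem.List.pop? ((c :: cs).map (fun x => (x, pvMinSim x (p :: ps)))) ((bi : Nat) : Int)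
            = some ((((c :: cs).map (fun x => (x, pvMinSim x (p :: ps))))[bi]'(by simpa using hbi)),
                (((c :: cs).map (fun x => (x, pvMinSim x (p :: ps)))).eraseIdx bi)) := by
          exact PySem.List.pop?_natCast _ bi (by simpa using hbi)
        simp only [pvLoopA, pvLoopB, hA, hB]
        rw [if_pos ⟨by simp, hk⟩, if_pos ⟨by simp, hk⟩]
        simp only [hrem, hpop]
        rw [pv_eraseIdx_map, List.map_map]
        have hmap : ((c :: cs).eraseIdx bi).map
              ((fun cs' => (cs'.1, min cs'.2 (pvSim cs'.1 ((c :: cs)[bi])))) ∘ (fun x => (x, pvMinSim x (p :: ps))))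
            = ((c :: cs).eraseIdx bi).map (fun x => (x, pvMinSim x (p :: (ps ++ [(c :: cs)[bi]])))) := by
          apply List.map_congr_left
          intro x _
          simp only [Function.comp]
          have := pvMinSim_append x ((c :: cs)[bi]) p ps
          simp only [List.cons_append] at this
          rw [this]
        rw [hmap]
        have := ih ((c :: cs).eraseIdx bi) p (ps ++ [(c :: cs)[bi]]) k
        simpa using this
      · have hk' : ¬((ps.length : Int) + 1 < k) := by
          simp only [List.length_cons, Nat.cast_add, Nat.cast_one] at hk; exact hk
        simp [pvLoopA, pvLoopB, hk']

-- ===== VERDICT (by name: the statement is the Claim_ definition above) =====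
theorem diversify_rank_spec : Claim_equal_diversify_rank := by
  intro candidates k _
  unfold Spec_diversify_rank
  cases candidates with
  | nil => rfl
  | cons c0 rest =>
    show pvLoopA rest.length [c0] rest k = pvLoopB rest.length [c0] (rest.map (fun c => (c, pvSim c c0))) k
    have h : (fun c => (c, pvSim c c0)) = (fun c => (c, pvMinSim c [c0])) := by
      funext c; simp [pvMinSim]
    rw [h]; exact pvLoop_eq rest.length rest c0 [] k
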